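-- pv_equiv track=rewrite | github.com/parthenon7/Gutenberg_KnowledgeEngine_App | retrieval_utils.py | reorder_for_attention_curve
-- ===== SOURCE A (Python) =====
-- def reorder_for_attention_curve(ranked_chunks: list[str]) -> list[str]:
--     if not ranked_chunks: return []
--     reordered = [None] * len(ranked_chunks)
--     left_index, right_index = 0, len(ranked_chunks) - 1
--     for i, chunk in enumerate(ranked_chunks):
--         if i % 2 == 0:
--             reordered[left_index] = chunk
--             left_index += 1
--         else:
--             reordered[right_index] = chunk
--             right_index -= 1
--     return reordered
-- ===== SOURCE B (Python) =====
-- def reorder_for_attention_curve(ranked_chunks: list[str]) -> list[str]: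
--     evens = ranked_chunks[0::2]
--     odds = ranked_chunks[1::2]
--     return evens + odds[::-1]
-- ===== Notes on version B (the rewrite author's own statement) =====
-- stated objective: simpler
-- what changed: Replaces the preallocated buffer and two moving scatter pointers with two strided slices (even/odd positions) concatenated with the odd slice reversed.
import Mathlib
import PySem

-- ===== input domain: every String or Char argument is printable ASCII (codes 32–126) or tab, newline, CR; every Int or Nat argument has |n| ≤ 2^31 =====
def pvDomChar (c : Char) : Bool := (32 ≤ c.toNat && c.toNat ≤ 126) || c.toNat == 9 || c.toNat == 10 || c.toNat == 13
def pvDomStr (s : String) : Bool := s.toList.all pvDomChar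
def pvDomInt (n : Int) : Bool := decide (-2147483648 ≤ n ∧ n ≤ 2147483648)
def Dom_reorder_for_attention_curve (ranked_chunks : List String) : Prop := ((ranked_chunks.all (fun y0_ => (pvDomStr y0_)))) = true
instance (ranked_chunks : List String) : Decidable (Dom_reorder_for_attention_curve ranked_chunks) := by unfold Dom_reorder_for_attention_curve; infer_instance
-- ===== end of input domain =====

-- B replaces A's preallocated buffer and two moving scatter pointers with two
-- strided slices (even/odd positions) joined with the odd slice reversed (simpler).


-- ===== PORT A =====
-- Python's [None] * n is modelled as a buffer of "" placeholders: the loop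
-- overwrites every slot, so the placeholder value is never returned.
def reorder_for_attention_curve (ranked_chunks : List String) : List String :=
  if ranked_chunks = [] then []
  else
    let reordered : List String := List.replicate ranked_chunks.length ""
    let res := (PySem.List.enumerate ranked_chunks 0).foldl
      (fun (st : List String × Int × Int) p =>
        if p.1 % 2 = 0 then
          (PySem.List.pySetD st.1 st.2.1 p.2, st.2.1 + 1, st.2.2)
        else
          (PySem.List.pySetD st.1 st.2.2 p.2, st.2.1, st.2.2 - 1))
      (reordered, 0, (ranked_chunks.length : Int) - 1)
    res.1

-- ===== PORT B =====
def reorder_for_attention_curve_alt (ranked_chunks : List String) : List String :=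
  let evens := (PySem.List.slice? ranked_chunks (some 0) none 2).getD []
  let odds := (PySem.List.slice? ranked_chunks (some 1) none 2).getD []
  evens ++ (PySem.List.slice? odds none none (-1)).getD []

-- ===== PRECONDITION & SPEC =====
def Spec_reorder_for_attention_curve (ranked_chunks : List String) (out : List String) : Prop := out = reorder_for_attention_curve_alt ranked_chunks
instance (ranked_chunks : List String) (out : List String) : Decidable (Spec_reorder_for_attention_curve ranked_chunks out) := by unfold Spec_reorder_for_attention_curve; infer_instance

-- ===== CLAIM (what is proved, stated in full; the proofs are below) =====
def Claim_equal_reorder_for_attention_curve : Prop := ∀ (ranked_chunks : List String), Dom_reorder_for_attention_curve ranked_chunks → Spec_reorder_for_attention_curve ranked_chunks (reorder_for_attention_curve ranked_chunks)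

-- ===== LEMMAS AND PROOFS =====

-- the elements at even positions
def pvEvens : List String → List String
  | [] => []
  | [x] => [x]
  | x :: _ :: rest => x :: pvEvens rest

-- the elements at odd positions
def pvOdds : List String → List String
  | [] => []
  | [_] => []
  | _ :: y :: rest => y :: pvOdds rest

theorem fm_evens : ∀ xs : List String,
    (List.range ((xs.length + 1) / 2)).filterMap (fun k => xs[2 * k]?) = pvEvens xs
  | [] => by simp [pvEvens]
  | [x] => by simp [pvEvens]
  | x :: y :: rest => by
      have h : ((x :: y :: rest).length + 1) / 2 = (rest.length + 1) / 2 + 1 := by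
        simp; omega
      rw [h, List.range_succ_eq_map]
      simp only [List.filterMap_cons, List.filterMap_map]
      have h2 : ((fun k => (x :: y :: rest)[2 * k]?) ∘ (· + 1)) = fun k => rest[2 * k]? := by
        funext k
        show (x :: y :: rest)[2 * (k + 1)]? = rest[2 * k]?
        rw [show 2 * (k + 1) = (2 * k) + 1 + 1 by omega]
        simp
      rw [h2, fm_evens rest]
      simp [pvEvens]

theorem fm_odds : ∀ xs : List String,
    (List.range (xs.length / 2)).filterMap (fun k => xs[1 + 2 * k]?) = pvOdds xs
  | [] => by simp [pvOdds]
  | [x] => by simp [pvOdds]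
  | x :: y :: rest => by
      have h : (x :: y :: rest).length / 2 = rest.length / 2 + 1 := by
        simp; omega
      rw [h, List.range_succ_eq_map]
      simp only [List.filterMap_cons, List.filterMap_map]
      have h2 : ((fun k => (x :: y :: rest)[1 + 2 * k]?) ∘ (· + 1)) = fun k => rest[1 + 2 * k]? := by
        funext k
        show (x :: y :: rest)[1 + 2 * (k + 1)]? = rest[1 + 2 * k]?
        rw [show 1 + 2 * (k + 1) = (1 + 2 * k) + 1 + 1 by omega]
        simp
      rw [h2, fm_odds rest]
      simp [pvOdds]

theorem slice2_from0 (xs : List String) :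
    (PySem.List.slice? xs (some 0) none 2).getD [] = pvEvens xs := by
  unfold PySem.List.slice? PySem.List.sliceIndices
  norm_num
  have hf : ∀ k : ℕ, ((2 * (k:Int)).toNat) = 2 * k := by intro k; omega
  simp only [hf]
  have hc : (if 0 < xs.length then (((xs.length:Int) + 2 - 1) / 2).toNat else 0) = (xs.length + 1) / 2 := by
    split_ifs <;> omega
  rw [hc, fm_evens]

theorem slice2_from1 (xs : List String) :
    (PySem.List.slice? xs (some 1) none 2).getD [] = pvOdds xs := by
  unfold PySem.List.slice? PySem.List.sliceIndices
  norm_num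
  by_cases h : xs = []
  · subst h; simp [pvOdds]
  · have hn : 1 ≤ xs.length := List.length_pos_iff.mpr h
    have hm : min (1:Int) xs.length = 1 := by omega
    simp only [hm]
    have hf : ∀ k : ℕ, ((1 + 2 * (k:Int)).toNat) = 1 + 2 * k := by intro k; omega
    simp only [hf]
    have hc : (if 1 < xs.length then (((xs.length:Int) - 1 + 2 - 1) / 2).toNat else 0) = xs.length / 2 := by
      split_ifs <;> omega
    rw [hc, fm_odds]

theorem alt_eq (xs : List String) :
    reorder_for_attention_curve_alt xs = pvEvens xs ++ (pvOdds xs).reverse := by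
  simp [reorder_for_attention_curve_alt, slice2_from0, slice2_from1,
    PySem.List.slice?_none_none_neg_one]

theorem set_mid (E : List String) (L R : List String) (v : String) (h : 0 < L.length) :
    (E ++ L ++ R).set E.length v = E ++ L.set 0 v ++ R := by
  rw [List.append_assoc, List.set_append_right _ _ (Nat.le_refl _), Nat.sub_self,
    List.set_append_left _ _ h, List.append_assoc]

-- loop invariant of A's scatter loop: processing xs into the unfilled middle of
-- the buffer, with even parity at the current index, yields evens then reversed odds
theorem loopA : ∀ (xs E R : List String) (i : Int), i % 2 = 0 →
    (((PySem.List.enumerate xs i).foldl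
      (fun (st : List String × Int × Int) p =>
        if p.1 % 2 = 0 then
          (PySem.List.pySetD st.1 st.2.1 p.2, st.2.1 + 1, st.2.2)
        else
          (PySem.List.pySetD st.1 st.2.2 p.2, st.2.1, st.2.2 - 1))
      (E ++ List.replicate xs.length "" ++ R, (E.length : Int),
        (E.length : Int) + xs.length - 1)).1)
    = E ++ pvEvens xs ++ (pvOdds xs).reverse ++ R
  | [], E, R, i, hi => by
      simp [PySem.List.enumerate_nil, pvEvens, pvOdds]
  | [x], E, R, i, hi => by
      simp only [PySem.List.enumerate_cons, PySem.List.enumerate_nil, List.foldl_cons,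
        List.foldl_nil, if_pos hi, PySem.List.pySetD_natCast, List.length_cons,
        List.length_nil]
      rw [set_mid _ _ _ _ (by simp)]
      simp [pvEvens, pvOdds]
  | x :: y :: rest, E, R, i, hi => by
      have hi1 : ¬ ((i + 1) % 2 = 0) := by omega
      simp only [PySem.List.enumerate_cons, List.foldl_cons, if_pos hi, if_neg hi1,
        PySem.List.pySetD_natCast, List.length_cons]
      rw [set_mid _ _ _ _ (by simp)]
      have hr : ((E.length : Int) + ((rest.length + 1 + 1 : Nat) : Int) - 1)
          = ((E.length + rest.length + 1 : Nat) : Int) := by push_cast; ring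
      rw [hr, PySem.List.pySetD_natCast]
      have hsplit : E ++ (List.replicate (rest.length + 1 + 1) "").set 0 x ++ R
          = (E ++ [x] ++ List.replicate rest.length "") ++ ("" :: R) := by
        rw [List.replicate_succ, List.set_cons_zero, List.replicate_succ']
        simp
      rw [hsplit, List.set_append_right _ _ (by simp; omega)]
      have hidx : E.length + rest.length + 1 - (E ++ [x] ++ List.replicate rest.length "").length
          = 0 := by simp
      rw [hidx, List.set_cons_zero]
      have hl : (E.length : Int) + 1 = ((E ++ [x]).length : Int) := by simp
      have hr2 : ((E.length + rest.length + 1 : Nat) : Int) - 1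
          = ((E ++ [x]).length : Int) + rest.length - 1 := by simp; ring
      rw [hl, hr2]
      have hshape : (E ++ [x] ++ List.replicate rest.length "") ++ (y :: R)
          = (E ++ [x]) ++ List.replicate rest.length "" ++ (y :: R) := by simp
      rw [hshape, loopA rest (E ++ [x]) (y :: R) (i + 1 + 1) (by omega)]
      simp [pvEvens, pvOdds]

-- ===== VERDICT (by name: the statement is the Claim_ definition above) =====
theorem reorder_for_attention_curve_spec : Claim_equal_reorder_for_attention_curve := by
  intro xs _
  unfold Spec_reorder_for_attention_curve
  rw [alt_eq]
  by_cases h : xs = []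
  · subst h; simp [reorder_for_attention_curve, pvEvens, pvOdds]
  · have := loopA xs [] [] 0 (by decide)
    simp only [List.nil_append, List.append_nil, List.length_nil, Nat.cast_zero,
      zero_add] at this
    simp only [reorder_for_attention_curve, if_neg h]
    rw [← this]
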